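-- pv_equiv track=rewrite | github.com/ogdowski/squigleague | backend/app/leagues/scoring.py | apply_tiebreakers
-- ===== SOURCE A (Python) =====
-- def apply_tiebreakers(standings: list[dict]) -> list[dict]:
--     """
--     Apply tiebreaker rules to standings with equal points.
--
--     Tiebreaker order (from APP_REWRITE_PLAN.md):
--     1. Total points (already sorted)
--     2. Head-to-head record (if applicable)
--     3. Total wins
--     4. Goal difference (sum of battle point differences)
--
--     Args:
--         standings: List of standing dictionaries sorted by total_points
--
--     Returns:
--         Same list with positions adjusted for tiebreakers
--     """
--     # Group by total_points
--     tied_groups = {}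
--     for standing in standings:
--         points = standing["total_points"]
--         if points not in tied_groups:
--             tied_groups[points] = []
--         tied_groups[points].append(standing)
--
--     # Apply tiebreakers within each group
--     result = []
--     position = 1
--
--     for points in sorted(tied_groups.keys(), reverse=True):
--         group = tied_groups[points]
--
--         if len(group) == 1:
--             # No tie
--             group[0]["position"] = position
--             result.append(group[0])
--             position += 1
--         else:
--             # Apply tiebreakers
--             # Sort by: wins (desc), then goal_difference (desc)
--             group.sort(key=lambda x: (
--                 -x.get("wins", 0),
--                 -x.get("goal_difference", 0)
--             ))
--
--             for standing in group:
--                 standing["position"] = position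
--                 result.append(standing)
--                 position += 1
--
--     return result
-- ===== SOURCE B (Python) =====
-- def apply_tiebreakers(standings: list[dict]) -> list[dict]:
--     # Two stable sort passes replace A's grouping dict + per-group sort:
--     # secondary keys first, then the primary key; stability keeps A's tie order.
--     result = sorted(standings, key=lambda x: (-x.get("wins", 0),
--                                               -x.get("goal_difference", 0)))
--     result.sort(key=lambda x: -x["total_points"])
--     for i, standing in enumerate(result):
--         standing["position"] = i + 1
--     return result
-- ===== Notes on version B (the rewrite author's own statement) =====
-- stated objective: simpler
-- what changed: Replaced A's group-by-points dict, descending key loop and per-group tiebreaker sort with two stable sort passes (secondary keys, then primary points key) followed by a single enumerate pass assigning positions.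
import Mathlib
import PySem

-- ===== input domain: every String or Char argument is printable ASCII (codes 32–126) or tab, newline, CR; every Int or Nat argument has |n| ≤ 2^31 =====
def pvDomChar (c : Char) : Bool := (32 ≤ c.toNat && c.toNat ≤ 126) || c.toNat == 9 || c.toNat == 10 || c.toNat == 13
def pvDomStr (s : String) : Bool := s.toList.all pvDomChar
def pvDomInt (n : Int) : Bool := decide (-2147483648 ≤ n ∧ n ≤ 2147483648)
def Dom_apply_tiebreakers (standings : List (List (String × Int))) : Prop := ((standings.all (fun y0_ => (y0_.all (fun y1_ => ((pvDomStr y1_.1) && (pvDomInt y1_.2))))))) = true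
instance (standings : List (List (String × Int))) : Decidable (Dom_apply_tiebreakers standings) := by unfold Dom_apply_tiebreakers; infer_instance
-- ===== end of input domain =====

-- B replaces A's group-by-points dict and per-group tiebreaker sort with two stable
-- sort passes plus one enumerate pass (simpler decomposition, same cost).  Both the
-- Python A and Python B mutate the row dicts in place ("position"); the equivalence
-- proved here is about the returned value.


-- shared key helpers (both Pythons read the same three fields; 0-defaults as in .get)
def pvKeyP (st : PySem.Dict String Int) : Int := st.getD "total_points" 0
def pvKeyW (st : PySem.Dict String Int) : Int := -(st.getD "wins" 0)
def pvKeyG (st : PySem.Dict String Int) : Int := -(st.getD "goal_difference" 0)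

-- ===== PORT A =====
-- 'if points not in d: d[points] = []' followed by 'd[points].append(st)' is
-- d[points] = d.get(points, []) + [st], i.e. Dict.modify.  standing["total_points"]
-- is ported as getD _ 0: exact under Pre_ (Python raises KeyError when the key is missing).
def apply_tiebreakers (standings : List (List (String × Int))) : List (List (String × Int)) :=
  let rows := standings.map (fun r => PySem.Dict.ofList r)
  let tied : PySem.Dict Int (List (PySem.Dict String Int)) :=
    rows.foldl (fun d st => d.modify (pvKeyP st) [] (fun g => g ++ [st])) PySem.Dict.empty
  let res :=
    (PySem.List.sorted tied.keys (fun k => k) true).foldl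
      (fun (acc : List (PySem.Dict String Int) × Int) points =>
        let group := tied.getD points []
        if group.length = 1 then
          (acc.1 ++ [(group.headD PySem.Dict.empty).insert "position" acc.2], acc.2 + 1)
        else
          (PySem.List.sorted2 group pvKeyW pvKeyG).foldl
            (fun a st => (a.1 ++ [st.insert "position" a.2], a.2 + 1)) acc)
      ([], 1)
  res.1.map (fun d => d.items)

-- ===== PORT B =====
def apply_tiebreakers_alt (standings : List (List (String × Int))) : List (List (String × Int)) :=
  let rows := standings.map (fun r => PySem.Dict.ofList r)
  let r1 := PySem.List.sorted2 rows pvKeyW pvKeyG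
  let r2 := PySem.List.sorted r1 (fun st => -(pvKeyP st)) false
  ((PySem.List.enumerate r2 0).map (fun q => q.2.insert "position" (q.1 + 1))).map
    (fun d => d.items)

-- ===== PRECONDITION & SPEC =====
-- Pre_ excludes exactly the rows without a "total_points" key, on which the Python A
-- raises KeyError.
def Pre_apply_tiebreakers (standings : List (List (String × Int))) : Prop :=
  ∀ row ∈ standings, "total_points" ∈ row.map Prod.fst
instance (standings : List (List (String × Int))) : Decidable (Pre_apply_tiebreakers standings) := by unfold Pre_apply_tiebreakers; infer_instance
def pvWitness_apply_tiebreakers : (List (List (String × Int))) :=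
  [[("total_points", 3), ("wins", 1)], [("total_points", 3), ("wins", 2)]]
def Spec_apply_tiebreakers (standings : List (List (String × Int))) (out : List (List (String × Int))) : Prop := out = apply_tiebreakers_alt standings
instance (standings : List (List (String × Int))) (out : List (List (String × Int))) : Decidable (Spec_apply_tiebreakers standings out) := by unfold Spec_apply_tiebreakers; infer_instance

-- ===== CLAIM (what is proved, stated in full; the proofs are below) =====
def Claim_equal_apply_tiebreakers : Prop := ∀ (standings : List (List (String × Int))), Dom_apply_tiebreakers standings → Pre_apply_tiebreakers standings → Spec_apply_tiebreakers standings (apply_tiebreakers standings)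

-- ===== LEMMAS AND PROOFS =====

-- Both sorts are the same insertion-sort fold; pvSortF names it so the stability
-- facts below can be proved once for an abstract 'before'.
def pvSortF {α : Type} (before : α → α → Bool) (xs : List α) : List α :=
  xs.foldl (fun acc x => PySem.List.insertBy before x acc) []

theorem pvSortF_append {α : Type} (before : α → α → Bool) (xs : List α) (x : α) :
    pvSortF before (xs ++ [x]) = PySem.List.insertBy before x (pvSortF before xs) := by
  simp [pvSortF]

theorem sorted_eq_pvSortF {α : Type} (key : α → Int) (xs : List α) :
    PySem.List.sorted xs key false = pvSortF (fun a b => decide (key a < key b)) xs := rfl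

theorem sorted2_eq_pvSortF {α : Type} (k1 k2 : α → Int) (xs : List α) :
    PySem.List.sorted2 xs k1 k2 false =
      pvSortF (fun a b => decide (k1 a < k1 b) || (!decide (k1 b < k1 a) && decide (k2 a < k2 b))) xs := rfl

theorem pvInsertBy_cons {α : Type} (before : α → α → Bool) (x y : α) (ys : List α) :
    PySem.List.insertBy before x (y :: ys) =
      if before x y then x :: y :: ys else y :: PySem.List.insertBy before x ys := rfl

theorem pvInsertBy_all {α : Type} (before : α → α → Bool) (x : α) (l : List α)
    (h : ∀ z ∈ l, before x z = true) : PySem.List.insertBy before x l = x :: l := by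
  cases l with
  | nil => rfl
  | cons y ys => rw [pvInsertBy_cons, h y (by simp)]; simp

theorem pvInsertBy_skip {α : Type} (before : α → α → Bool) (x : α) (G R : List α)
    (h : ∀ y ∈ G, before x y = false) :
    PySem.List.insertBy before x (G ++ R) = G ++ PySem.List.insertBy before x R := by
  induction G with
  | nil => rfl
  | cons y ys ih =>
    rw [List.cons_append, pvInsertBy_cons, h y (by simp)]
    simp only [Bool.false_eq_true, if_false, List.cons_append, List.cons.injEq, true_and]
    exact ih (fun z hz => h z (by simp [hz]))

theorem pvPairwise_insertBy {α : Type} (before : α → α → Bool)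
    (hasym : ∀ a b, before a b = true → before b a = false)
    (htr : ∀ a b c, before a b = true → before c b = false → before a c = true)
    (x : α) (l : List α) (hl : l.Pairwise (fun a b => before b a = false)) :
    (PySem.List.insertBy before x l).Pairwise (fun a b => before b a = false) := by
  induction l with
  | nil => simp [PySem.List.insertBy]
  | cons y ys ih =>
    rw [pvInsertBy_cons]
    rcases List.pairwise_cons.mp hl with ⟨hy, hys⟩
    by_cases hxy : before x y = true
    · rw [if_pos hxy]
      refine List.pairwise_cons.mpr ⟨?_, hl⟩
      intro z hz
      rcases List.mem_cons.mp hz with rfl | hz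
      · exact hasym _ _ hxy
      · by_contra hc
        have hzx : before z x = true := by
          cases h : before z x with
          | true => rfl
          | false => exact absurd h hc
        have : before z y = true := htr z x y hzx (hasym _ _ hxy)
        rw [hy z hz] at this; exact Bool.false_ne_true this
    · rw [if_neg hxy]
      refine List.pairwise_cons.mpr ⟨?_, ih hys⟩
      intro z hz
      rcases (PySem.List.mem_insertBy _ _ _ _).mp hz with rfl | hz
      · simpa using hxy
      · exact hy z hz

theorem pvPairwise_pvSortF {α : Type} (before : α → α → Bool)
    (hasym : ∀ a b, before a b = true → before b a = false)
    (htr : ∀ a b c, before a b = true → before c b = false → before a c = true)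
    (xs : List α) :
    (pvSortF before xs).Pairwise (fun a b => before b a = false) := by
  induction xs using List.reverseRecOn with
  | nil => simp [pvSortF]
  | append_singleton xs x ih =>
    rw [pvSortF_append]
    exact pvPairwise_insertBy before hasym htr x _ ih

theorem pvFilter_insertBy {α : Type} (before : α → α → Bool)
    (htr : ∀ a b c, before a b = true → before c b = false → before a c = true)
    (p : α → Bool) (x : α) (l : List α)
    (hl : l.Pairwise (fun a b => before b a = false)) :
    (PySem.List.insertBy before x l).filter p =
      if p x then PySem.List.insertBy before x (l.filter p) else l.filter p := by
  induction l with
  | nil =>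
    simp only [PySem.List.insertBy, List.filter_nil]
    by_cases hp : p x <;> simp [hp, List.filter]
  | cons y ys ih =>
    rcases List.pairwise_cons.mp hl with ⟨hy, hys⟩
    rw [pvInsertBy_cons]
    by_cases hxy : before x y = true
    · rw [if_pos hxy]
      by_cases hpx : p x
      · rw [if_pos hpx]
        by_cases hpy : p y
        · simp only [List.filter_cons, hpx, hpy, if_pos]
          rw [pvInsertBy_cons, if_pos hxy]
        · simp only [List.filter_cons, hpx, hpy]
          simp only [if_pos, Bool.false_eq_true, if_false]
          rw [pvInsertBy_all]
          intro z hz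
          have hz' : z ∈ ys := List.mem_of_mem_filter hz
          exact htr x y z hxy (hy z hz')
      · simp [List.filter_cons, hpx]
    · rw [if_neg hxy]
      by_cases hpy : p y
      · simp only [List.filter_cons, hpy, if_pos]
        rw [ih hys, pvInsertBy_cons]
        by_cases hpx : p x
        · rw [if_pos hpx, if_neg hxy, if_pos hpx]
        · rw [if_neg hpx, if_neg hpx]
      · simp only [List.filter_cons, hpy, Bool.false_eq_true, if_false]
        exact ih hys

theorem pvFilter_pvSortF {α : Type} (before : α → α → Bool)
    (hasym : ∀ a b, before a b = true → before b a = false)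
    (htr : ∀ a b c, before a b = true → before c b = false → before a c = true)
    (p : α → Bool) (xs : List α) :
    (pvSortF before xs).filter p = pvSortF before (xs.filter p) := by
  induction xs using List.reverseRecOn with
  | nil => simp [pvSortF]
  | append_singleton xs x ih =>
    rw [pvSortF_append, pvFilter_insertBy before htr p x _ (pvPairwise_pvSortF before hasym htr xs),
      ih, List.filter_append]
    by_cases hp : p x
    · simp [hp, pvSortF_append]
    · simp [hp, List.filter]

-- stable sort by a descending Int key = concatenation of the key-classes, classes
-- listed along any strictly decreasing key list covering the input
theorem pvInsertBy_groups {α : Type} (key : α → Int) (x : α) (xs : List α) :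
    ∀ ks : List Int, ks.Pairwise (fun a b => b < a) → key x ∈ ks →
    PySem.List.insertBy (fun a b => decide (key b < key a)) x
        (ks.flatMap (fun v => xs.filter (fun y => key y == v)))
      = ks.flatMap (fun v => (xs ++ [x]).filter (fun y => key y == v)) := by
  intro ks
  induction ks with
  | nil => intro _ h; simp at h
  | cons v ks ih =>
    intro hp hx
    rcases List.pairwise_cons.mp hp with ⟨hv, hks⟩
    simp only [List.flatMap_cons]
    by_cases hkx : key x = v
    · have hfx : ∀ w, w ≠ key x →
          (xs ++ [x]).filter (fun y => key y == w) = xs.filter (fun y => key y == w) := by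
        intro w hw
        rw [List.filter_append]
        have hne : (key x == w) = false := by simpa using fun h => hw h.symm
        simp [List.filter, hne]
      rw [pvInsertBy_skip]
      · rw [pvInsertBy_all]
        · have h1 : (xs ++ [x]).filter (fun y => key y == v) =
              xs.filter (fun y => key y == v) ++ [x] := by
            rw [List.filter_append]; simp [List.filter, hkx]
          have h2 : ks.flatMap (fun v => (xs ++ [x]).filter (fun y => key y == v)) =
              ks.flatMap (fun v => xs.filter (fun y => key y == v)) := by
            simp only [List.flatMap_def]
            refine congrArg List.flatten (List.map_congr_left ?_)
            intro w hw
            exact hfx w (by have := hv w hw; omega)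
          rw [h1, h2]; simp
        · intro z hz
          simp only [List.mem_flatMap] at hz
          rcases hz with ⟨w, hw, hzw⟩
          have : key z = w := by simpa using List.of_mem_filter hzw
          have : key z < key x := by rw [this, hkx]; exact hv w hw
          simpa using this
      · intro y hy
        have : key y = v := by simpa using List.of_mem_filter hy
        simp [this, hkx]
    · have hx' : key x ∈ ks := by rcases List.mem_cons.mp hx with h | h; exact absurd h hkx; exact h
      have hlt : key x < v := hv _ hx'
      rw [pvInsertBy_skip]
      · rw [ih hks hx']
        congr 1
        have hne : (key x == v) = false := by simpa using hkx
        rw [List.filter_append]; simp [List.filter, hne]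
      · intro y hy
        have : key y = v := by simpa using List.of_mem_filter hy
        simp [this]; omega

theorem pvSortF_groups {α : Type} (key : α → Int) (ks : List Int)
    (hks : ks.Pairwise (fun a b => b < a)) (xs : List α)
    (hmem : ∀ x ∈ xs, key x ∈ ks) :
    pvSortF (fun a b => decide (key b < key a)) xs =
      ks.flatMap (fun v => xs.filter (fun y => key y == v)) := by
  induction xs using List.reverseRecOn with
  | nil => simp [pvSortF]
  | append_singleton xs x ih =>
    rw [pvSortF_append, ih (fun y hy => hmem y (by simp [hy]))]
    exact pvInsertBy_groups key x xs ks hks (hmem x (by simp))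

-- lexicographic 'before' of sorted2: asymmetric and suitably transitive
theorem pvLex_asym {α : Type} (k1 k2 : α → Int) (a b : α) :
    (decide (k1 a < k1 b) || (!decide (k1 b < k1 a) && decide (k2 a < k2 b))) = true →
    (decide (k1 b < k1 a) || (!decide (k1 a < k1 b) && decide (k2 b < k2 a))) = false := by
  intro h
  rw [Bool.eq_false_iff]
  intro h'
  simp only [Bool.or_eq_true, Bool.and_eq_true, Bool.not_eq_true', decide_eq_true_eq,
    decide_eq_false_iff_not] at h h'
  omega

theorem pvLex_trans {α : Type} (k1 k2 : α → Int) (a b c : α) :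
    (decide (k1 a < k1 b) || (!decide (k1 b < k1 a) && decide (k2 a < k2 b))) = true →
    (decide (k1 c < k1 b) || (!decide (k1 b < k1 c) && decide (k2 c < k2 b))) = false →
    (decide (k1 a < k1 c) || (!decide (k1 c < k1 a) && decide (k2 a < k2 c))) = true := by
  intro h1 h2
  rw [Bool.eq_false_iff] at h2
  simp only [ne_eq, Bool.or_eq_true, Bool.and_eq_true, Bool.not_eq_true', decide_eq_true_eq,
    decide_eq_false_iff_not, not_or, not_and] at h1 h2 ⊢
  omega

-- the three assignment/enumeration loop shapes
theorem pvFoldl_pos (l : List (PySem.Dict String Int)) :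
    ∀ (acc : List (PySem.Dict String Int)) (p : Int),
    l.foldl (fun a st => (a.1 ++ [st.insert "position" a.2], a.2 + 1)) (acc, p)
      = (acc ++ (PySem.List.enumerate l p).map (fun q => q.2.insert "position" q.1),
         p + l.length) := by
  induction l with
  | nil => intro acc p; simp [PySem.List.enumerate_nil]
  | cons st ys ih =>
    intro acc p
    rw [List.foldl_cons, ih, PySem.List.enumerate_cons]
    simp only [List.map_cons, List.length_cons, Prod.mk.injEq]
    refine ⟨by simp, by push_cast; ring⟩

theorem pvEnum_shift (l : List (PySem.Dict String Int)) :
    ∀ s : Int,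
    (PySem.List.enumerate l s).map (fun q => q.2.insert "position" (q.1 + 1))
      = (PySem.List.enumerate l (s + 1)).map (fun q => q.2.insert "position" q.1) := by
  induction l with
  | nil => intro s; simp [PySem.List.enumerate_nil]
  | cons st ys ih =>
    intro s
    rw [PySem.List.enumerate_cons, PySem.List.enumerate_cons, List.map_cons, List.map_cons, ih]

theorem pvFoldl_flatMap {α β γ : Type} (g : γ → List α) (step : β → α → β) (ks : List γ) :
    ∀ init : β, (ks.flatMap g).foldl step init
      = ks.foldl (fun acc v => (g v).foldl step acc) init := by
  induction ks with
  | nil => intro init; rfl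
  | cons v ks ih =>
    intro init
    rw [List.flatMap_cons, List.foldl_append, List.foldl_cons, ih]

-- A's grouping dict, characterised
theorem pvGroups_getD (rows : List (PySem.Dict String Int)) (v : Int) :
    ((rows.foldl (fun d st => d.modify (pvKeyP st) [] (fun g => g ++ [st]))
        PySem.Dict.empty).getD v [])
      = rows.filter (fun st => pvKeyP st == v) := by
  have hf : rows.foldl (fun d st => d.modify (pvKeyP st) [] (fun g => g ++ [st]))
        PySem.Dict.empty
      = (rows.map (fun st => (pvKeyP st, st))).foldl
          (fun d p => d.modify p.1 [] (fun g => g ++ [p.2])) PySem.Dict.empty := by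
    rw [List.foldl_map]
  rw [hf, PySem.Dict.getD_foldl_modify_append]
  simp [List.filter_map, Function.comp_def]

theorem pvGroups_keys (rows : List (PySem.Dict String Int)) :
    (rows.foldl (fun d st => d.modify (pvKeyP st) [] (fun g => g ++ [st]))
        PySem.Dict.empty).keys
      = PySem.Set.ofList (rows.map pvKeyP) := by
  rw [PySem.Dict.keys_foldl_modify_key]
  simp [PySem.Set.update_nil_left]

theorem pvKs_desc (keysl : List Int) (hnd : keysl.Nodup) :
    (PySem.List.sorted keysl (fun k => k) true).Pairwise (fun a b => b < a) := by
  have h1 : (PySem.List.sorted keysl (fun k => k) true).Pairwise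
      (fun a b => (fun k => k) b ≤ (fun k => k) a) := PySem.List.sorted_pairwise_rev _ _
  have h2 : (PySem.List.sorted keysl (fun k => k) true).Nodup :=
    (PySem.List.sorted_perm keysl (fun k => k) true).symm.nodup hnd
  exact (h1.and h2).imp (fun h => lt_of_le_of_ne h.1 (Ne.symm h.2))

-- the singleton branch of A's loop is the general branch
theorem pvBranch (group : List (PySem.Dict String Int))
    (acc : List (PySem.Dict String Int) × Int) :
    (if group.length = 1 then
       (acc.1 ++ [(group.headD PySem.Dict.empty).insert "position" acc.2], acc.2 + 1)
     else (PySem.List.sorted2 group pvKeyW pvKeyG).foldl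
       (fun a st => (a.1 ++ [st.insert "position" a.2], a.2 + 1)) acc)
    = (PySem.List.sorted2 group pvKeyW pvKeyG).foldl
       (fun a st => (a.1 ++ [st.insert "position" a.2], a.2 + 1)) acc := by
  split_ifs with h
  · rcases List.length_eq_one_iff.mp h with ⟨g, rfl⟩
    rfl
  · rfl

-- main list-level equality between the two pipelines
theorem pvMain (rows : List (PySem.Dict String Int)) :
    (((PySem.List.sorted
        (rows.foldl (fun d st => d.modify (pvKeyP st) [] (fun g => g ++ [st]))
            PySem.Dict.empty).keys (fun k => k) true).foldl
        (fun (acc : List (PySem.Dict String Int) × Int) points =>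
          let group := (rows.foldl (fun d st => d.modify (pvKeyP st) [] (fun g => g ++ [st]))
              PySem.Dict.empty).getD points []
          if group.length = 1 then
            (acc.1 ++ [(group.headD PySem.Dict.empty).insert "position" acc.2], acc.2 + 1)
          else
            (PySem.List.sorted2 group pvKeyW pvKeyG).foldl
              (fun a st => (a.1 ++ [st.insert "position" a.2], a.2 + 1)) acc)
        ([], 1)).1)
    = (PySem.List.enumerate
        (PySem.List.sorted (PySem.List.sorted2 rows pvKeyW pvKeyG)
          (fun st => -(pvKeyP st)) false) 0).map
        (fun q => q.2.insert "position" (q.1 + 1)) := by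
  have hkeys := pvGroups_keys rows
  have hnd : (rows.foldl (fun d st => d.modify (pvKeyP st) [] (fun g => g ++ [st]))
      PySem.Dict.empty).keys.Nodup := by
    rw [hkeys]; exact PySem.Set.nodup_ofList _
  have hdesc := pvKs_desc _ hnd
  have hmem : ∀ x ∈ PySem.List.sorted2 rows pvKeyW pvKeyG,
      pvKeyP x ∈ PySem.List.sorted
        (rows.foldl (fun d st => d.modify (pvKeyP st) [] (fun g => g ++ [st]))
            PySem.Dict.empty).keys (fun k => k) true := by
    intro x hx
    have hx' : x ∈ rows := (PySem.List.sorted2_perm rows pvKeyW pvKeyG false).mem_iff.mp hx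
    rw [PySem.List.mem_sorted, hkeys, PySem.Set.mem_ofList]
    exact List.mem_map_of_mem hx'
  -- B's second sort, regrouped along A's sorted key list
  have hB : PySem.List.sorted (PySem.List.sorted2 rows pvKeyW pvKeyG)
        (fun st => -(pvKeyP st)) false
      = (PySem.List.sorted
          (rows.foldl (fun d st => d.modify (pvKeyP st) [] (fun g => g ++ [st]))
              PySem.Dict.empty).keys (fun k => k) true).flatMap
          (fun v => PySem.List.sorted2 (rows.filter (fun y => pvKeyP y == v)) pvKeyW pvKeyG) := by
    have hbp : (fun (a b : PySem.Dict String Int) => decide (-(pvKeyP a) < -(pvKeyP b)))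
        = fun a b => decide (pvKeyP b < pvKeyP a) := by
      funext a b
      rw [decide_eq_decide]
      exact neg_lt_neg_iff
    calc PySem.List.sorted (PySem.List.sorted2 rows pvKeyW pvKeyG)
          (fun st => -(pvKeyP st)) false
        = pvSortF (fun a b => decide (pvKeyP b < pvKeyP a))
            (PySem.List.sorted2 rows pvKeyW pvKeyG) := by
          rw [sorted_eq_pvSortF, hbp]
      _ = (PySem.List.sorted
            (rows.foldl (fun d st => d.modify (pvKeyP st) [] (fun g => g ++ [st]))
                PySem.Dict.empty).keys (fun k => k) true).flatMap
            (fun v => (PySem.List.sorted2 rows pvKeyW pvKeyG).filter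
              (fun y => pvKeyP y == v)) :=
          pvSortF_groups pvKeyP _ hdesc _ hmem
      _ = _ := by
          simp only [List.flatMap_def]
          refine congrArg List.flatten (List.map_congr_left ?_)
          intro v _
          rw [sorted2_eq_pvSortF, sorted2_eq_pvSortF,
            pvFilter_pvSortF _ (pvLex_asym pvKeyW pvKeyG) (pvLex_trans pvKeyW pvKeyG)]
  -- A's loop, with the branch unified, flattened and turned into enumerate
  simp only []
  set tied := List.foldl (fun d st => d.modify (pvKeyP st) [] fun g => g ++ [st])
      PySem.Dict.empty rows with htied
  have hg : ∀ v, tied.getD v [] = rows.filter (fun st => pvKeyP st == v) := by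
    intro v; rw [htied]; exact pvGroups_getD rows v
  have hcong : List.foldl
      (fun (acc : List (PySem.Dict String Int) × Int) points =>
        if (tied.getD points []).length = 1 then
          (acc.1 ++ [((tied.getD points []).headD PySem.Dict.empty).insert "position" acc.2],
            acc.2 + 1)
        else
          List.foldl (fun a st => (a.1 ++ [st.insert "position" a.2], a.2 + 1)) acc
            (PySem.List.sorted2 (tied.getD points []) pvKeyW pvKeyG))
      ([], 1) (PySem.List.sorted tied.keys (fun k => k) true)
    = List.foldl
      (fun (acc : List (PySem.Dict String Int) × Int) points =>
        List.foldl (fun a st => (a.1 ++ [st.insert "position" a.2], a.2 + 1)) acc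
          (PySem.List.sorted2 (tied.getD points []) pvKeyW pvKeyG))
      ([], 1) (PySem.List.sorted tied.keys (fun k => k) true) :=
    PySem.List.foldl_congr_mem _ _ _ _ (fun acc points _ => pvBranch (tied.getD points []) acc)
  rw [hcong,
    ← pvFoldl_flatMap (g := fun points => PySem.List.sorted2 (tied.getD points []) pvKeyW pvKeyG),
    pvFoldl_pos]
  have hfinal : List.flatMap
        (fun v => PySem.List.sorted2 (tied.getD v []) pvKeyW pvKeyG)
        (PySem.List.sorted tied.keys (fun k => k) true)
      = List.flatMap
        (fun v => PySem.List.sorted2 (rows.filter (fun y => pvKeyP y == v)) pvKeyW pvKeyG)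
        (PySem.List.sorted tied.keys (fun k => k) true) := by
    simp only [List.flatMap_def]
    refine congrArg List.flatten (List.map_congr_left ?_)
    intro v _
    rw [hg v]
  rw [hfinal, ← hB, pvEnum_shift _ 0]
  norm_num

-- ===== VERDICT (by name: the statement is the Claim_ definition above) =====
theorem apply_tiebreakers_spec : Claim_equal_apply_tiebreakers := by
  intro standings _ _
  show apply_tiebreakers standings = apply_tiebreakers_alt standings
  unfold apply_tiebreakers apply_tiebreakers_alt
  exact congrArg (List.map (fun d => d.items))
    (pvMain (standings.map (fun r => PySem.Dict.ofList r)))
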